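-- pv_equiv track=rewrite | github.com/ukunV/python_for_coding_test | programmers_level_2/level_2_튜플.py | solution
-- ===== SOURCE A (Python) =====
-- from collections import Counter
-- from collections import Counter
--
-- def solution(s):
--     answer = []
--
--     s = Counter(s)
--     s = sorted(s.items(), key=lambda x: x[1], reverse=True)
--
--     for i in s:
--         if i[0].isdigit() == True:
--             answer.append(int(i[0]))
--
--     return answer
-- ===== SOURCE B (Python) =====
-- def solution(s):
--     counts = {}
--     for ch in s:
--         counts[ch] = counts.get(ch, 0) + 1
--     maxc = max(counts.values(), default=0)
--     buckets = [[] for _ in range(maxc + 1)]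
--     for ch, n in counts.items():
--         buckets[n].append(ch)
--     answer = []
--     for n in range(maxc, 0, -1):
--         for ch in buckets[n]:
--             if ch.isdigit():
--                 answer.append(int(ch))
--     return answer
-- ===== Notes on version B (the rewrite author's own statement) =====
-- stated objective: alternative
-- what changed: Replaces A's comparison sort of the (char, count) pairs by a counting/bucket pass: characters are placed into buckets indexed by their frequency (in first-occurrence order) and the buckets are emitted from the highest count down, yielding the identical stably-ordered list of digit ints.
import Mathlib
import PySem

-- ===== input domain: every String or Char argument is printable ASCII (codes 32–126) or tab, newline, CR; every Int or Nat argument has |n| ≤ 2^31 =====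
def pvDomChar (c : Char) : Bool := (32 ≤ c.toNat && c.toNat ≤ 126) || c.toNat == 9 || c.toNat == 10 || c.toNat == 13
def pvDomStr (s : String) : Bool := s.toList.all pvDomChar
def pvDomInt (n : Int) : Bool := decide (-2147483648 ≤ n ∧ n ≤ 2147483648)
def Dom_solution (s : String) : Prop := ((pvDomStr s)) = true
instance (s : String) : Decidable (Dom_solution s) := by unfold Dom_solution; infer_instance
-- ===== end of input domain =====

-- B replaces A's comparison sort of the (char, count) pairs by a counting/bucket pass over count values; same return value, stated as proved below.

-- shared helper: Python's int(c) on a one-character string; both Pythons call int(·) only under an isdigit() guard, where it returns a value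
def pyIntCh (c : Char) : Int := (PySem.Int.ofChars? [c]).getD 0

-- ===== PORT A =====
def solution (s : String) : List Int :=
  let cnt := PySem.Dict.counter s.toList
  let items := PySem.List.sorted cnt.items (fun x => x.2) true
  items.foldl (fun answer i => if PySem.Str.isdigit i.1 then answer ++ [pyIntCh i.1] else answer) ([] : List Int)

-- ===== PORT B =====
def solution_alt (s : String) : List Int :=
  let counts := s.toList.foldl (fun d c => d.insert c (d.getD c 0 + 1)) PySem.Dict.empty
  let maxc : Int := (PySem.List.max? counts.values (fun v => v)).getD 0
  let buckets := counts.items.foldl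
      (fun bs kv => bs.set kv.2.toNat (bs.getD kv.2.toNat [] ++ [kv.1]))
      (List.replicate (maxc.toNat + 1) ([] : List Char))
  (PySem.List.pyRange maxc 0 (-1)).foldl
    (fun answer n => (buckets.getD n.toNat []).foldl
        (fun a c => if PySem.Str.isdigit c then a ++ [pyIntCh c] else a) answer)
    ([] : List Int)

-- ===== PRECONDITION & SPEC =====
def Spec_solution (s : String) (out : List Int) : Prop := out = solution_alt s
instance (s : String) (out : List Int) : Decidable (Spec_solution s out) := by unfold Spec_solution; infer_instance

-- ===== CLAIM (what is proved, stated in full; the proofs are below) =====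
def Claim_equal_solution : Prop := ∀ (s : String), Dom_solution s → Spec_solution s (solution s)

-- ===== LEMMAS AND PROOFS =====

theorem flatMap_congr_mem {α β : Type} (l : List α) (f g : α → List β)
    (h : ∀ x ∈ l, f x = g x) : l.flatMap f = l.flatMap g := by
  induction l with
  | nil => rfl
  | cons x xs ih =>
    rw [List.flatMap_cons, List.flatMap_cons, h x (by simp),
      ih (fun y hy => h y (by simp [hy]))]

theorem insertBy_all_before {α : Type} (before : α → α → Bool) (x : α) (l : List α)
    (h : ∀ y ∈ l, before x y = true) :
    PySem.List.insertBy before x l = x :: l := by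
  cases l with
  | nil => rfl
  | cons y ys => simp [PySem.List.insertBy, h y (by simp)]

theorem insertBy_append_left {α : Type} (before : α → α → Bool) (x : α) (b l : List α)
    (h : ∀ y ∈ b, before x y = false) :
    PySem.List.insertBy before x (b ++ l) = b ++ PySem.List.insertBy before x l := by
  induction b with
  | nil => simp
  | cons y ys ih =>
    have hy : before x y = false := h y (by simp)
    simp [PySem.List.insertBy, hy, ih (fun z hz => h z (by simp [hz]))]

theorem insertBy_flat (r : List Int) (f : Int → List (Char × Int)) (x : Char × Int)
    (hs : r.Pairwise (fun a b => b < a))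
    (hf : ∀ n ∈ r, ∀ p ∈ f n, p.2 = n) (hx : x.2 ∈ r) :
    PySem.List.insertBy (fun a b => decide (b.2 < a.2)) x (r.flatMap f) =
      r.flatMap (fun n => f n ++ if x.2 = n then [x] else []) := by
  induction r with
  | nil => cases hx
  | cons n r' ih =>
    rw [List.flatMap_cons, List.flatMap_cons]
    rcases List.pairwise_cons.mp hs with ⟨hn, hs'⟩
    by_cases hxn : x.2 = n
    · rw [insertBy_append_left _ _ _ _ (fun y hy => by
        have := hf n (by simp) y hy; simp [this, hxn])]
      rw [insertBy_all_before _ _ _ (fun y hy => by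
        rcases List.mem_flatMap.mp hy with ⟨m, hm, hym⟩
        have h1 : y.2 = m := hf m (by simp [hm]) y hym
        have h2 : m < n := hn m hm
        simp only [decide_eq_true_eq, h1, hxn]; omega)]
      have heq : r'.flatMap (fun m => f m ++ if x.2 = m then [x] else []) = r'.flatMap f := by
        apply flatMap_congr_mem
        intro m hm
        have : x.2 ≠ m := by have := hn m hm; omega
        simp [this]
      rw [heq]
      simp [hxn]
    · have hx' : x.2 ∈ r' := (List.mem_cons.mp hx).resolve_left hxn
      have hxlt : x.2 < n := hn _ hx'
      rw [insertBy_append_left _ _ _ _ (fun y hy => by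
        have := hf n (by simp) y hy
        simp only [decide_eq_false_iff_not, this]; omega)]
      rw [ih hs' (fun m hm p hp => hf m (by simp [hm]) p hp) hx']
      simp [hxn]

theorem sorted_eq_flat (r : List Int) (hs : r.Pairwise (fun a b => b < a))
    (its : List (Char × Int)) (h : ∀ p ∈ its, p.2 ∈ r) :
    PySem.List.sorted its (fun x => x.2) true =
      r.flatMap (fun n => its.filter (fun p => decide (p.2 = n))) := by
  induction its using List.reverseRecOn with
  | nil => simp [PySem.List.sorted_rev_eq_foldl_insertBy]
  | append_singleton its x ih =>
    rw [PySem.List.sorted_rev_eq_foldl_insertBy, List.foldl_append, List.foldl_cons,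
      List.foldl_nil, ← PySem.List.sorted_rev_eq_foldl_insertBy]
    rw [ih (fun p hp => h p (by simp [hp]))]
    rw [insertBy_flat r _ x hs
      (fun n _ p hp => by
        have := List.mem_filter.mp hp
        exact of_decide_eq_true this.2)
      (h x (by simp))]
    apply flatMap_congr_mem
    intro n hn
    by_cases hx : x.2 = n <;> simp [List.filter_append, hx]

theorem buckets_spec (its : List (Char × Int)) :
    ∀ (bs0 : List (List Char)), (∀ kv ∈ its, kv.2.toNat < bs0.length) → ∀ j : Nat,
    (its.foldl (fun bs kv => bs.set kv.2.toNat (bs.getD kv.2.toNat [] ++ [kv.1])) bs0).getD j []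
      = bs0.getD j [] ++ (its.filter (fun kv => decide (kv.2.toNat = j))).map Prod.fst := by
  induction its with
  | nil => intro bs0 _ j; simp
  | cons kv rest ih =>
    intro bs0 h j
    rw [List.foldl_cons]
    rw [ih _ (fun p hp => by rw [List.length_set]; exact h p (by simp [hp]))]
    have hkv : kv.2.toNat < bs0.length := h kv (by simp)
    by_cases hj : kv.2.toNat = j
    · subst hj
      rw [List.getD_eq_getElem?_getD, List.getElem?_set_self (by omega)]
      simp [List.append_assoc]
    · rw [List.getD_eq_getElem?_getD, List.getElem?_set_ne hj, ← List.getD_eq_getElem?_getD]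
      simp [hj]

theorem replicate_getD (m j : Nat) :
    (List.replicate m ([] : List Char)).getD j [] = [] := by
  rw [List.getD_eq_getElem?_getD, List.getElem?_replicate]
  by_cases h : j < m <;> simp [h]

theorem solution_eq_alt (s : String) : solution s = solution_alt s := by
  simp only [solution, solution_alt]
  rw [PySem.Dict.foldl_insert_getD_add_one_eq_counter]
  generalize s.toList = cs
  set ks := PySem.Set.ofList cs with hks
  set maxc := (PySem.List.max? (PySem.Dict.counter cs).values fun v => v).getD 0 with hmaxc
  have hvals : (PySem.Dict.counter cs).values
      = ks.map (fun k => (cs.count k : Int)) := by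
    unfold PySem.Dict.values
    rw [PySem.Dict.items_counter, List.map_map]
    rfl
  have hle : ∀ k ∈ ks, (cs.count k : Int) ≤ maxc := by
    intro k hk
    have hmem : (cs.count k : Int) ∈ (PySem.Dict.counter cs).values := by
      rw [hvals]; exact List.mem_map_of_mem hk
    cases hopt : PySem.List.max? (PySem.Dict.counter cs).values (fun v => v) with
    | none =>
      rw [PySem.List.max?_eq_none_iff] at hopt
      rw [hopt] at hmem
      cases hmem
    | some m =>
      have h1 := PySem.List.max?_isMax hopt _ hmem
      rw [hmaxc, hopt]
      exact h1
  have hpos : ∀ k ∈ ks, 1 ≤ (cs.count k : Int) := by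
    intro k hk
    have : k ∈ cs := (PySem.Set.mem_ofList cs k).mp hk
    exact_mod_cast List.count_pos_iff.mpr this
  have hr : (PySem.List.pyRange maxc 0 (-1)).Pairwise (fun a b => b < a) := by
    rw [PySem.List.pyRange_neg_one, List.pairwise_map]
    exact List.Pairwise.imp (fun h => by omega) List.pairwise_lt_range
  have hmem : ∀ p ∈ (ks.map fun k => (k, (cs.count k : Int))),
      p.2 ∈ PySem.List.pyRange maxc 0 (-1) := by
    intro p hp
    rcases List.mem_map.mp hp with ⟨k, hk, rfl⟩
    rw [PySem.List.mem_pyRange_neg_one]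
    exact ⟨by have := hpos k hk; omega, hle k hk⟩
  rw [PySem.Dict.items_counter,
    sorted_eq_flat _ hr _ hmem, List.foldl_flatMap]
  apply PySem.List.foldl_congr_mem
  intro acc n hn
  have hb : ∀ kv ∈ (ks.map fun k => (k, (cs.count k : Int))),
      kv.2.toNat < (List.replicate (maxc.toNat + 1) ([] : List Char)).length := by
    intro kv hkv
    rcases List.mem_map.mp hkv with ⟨k, hk, rfl⟩
    have h1 := hle k hk
    have h2 := hpos k hk
    rw [List.length_replicate]
    omega
  rw [buckets_spec _ _ hb, replicate_getD, List.nil_append, List.foldl_map]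
  have hn' := PySem.List.mem_pyRange_neg_one.mp hn
  have hfil : List.filter (fun kv => decide (kv.2.toNat = n.toNat))
        (ks.map fun k => (k, (cs.count k : Int)))
      = List.filter (fun p => decide (p.2 = n))
        (ks.map fun k => (k, (cs.count k : Int))) := by
    apply List.filter_congr
    intro p hp
    rcases List.mem_map.mp hp with ⟨k, hk, rfl⟩
    have := hpos k hk
    simp only [decide_eq_decide]
    omega
  rw [hfil]

-- ===== VERDICT (by name: the statement is the Claim_ definition above) =====
theorem solution_spec : Claim_equal_solution := by
  unfold Claim_equal_solution Spec_solution
  intro s _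
  exact solution_eq_alt s
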